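-- pv_equiv track=rewrite | github.com/Yyuxin0822/LLM_EcoCircuit | tests/draft.py | maplistx
-- ===== SOURCE A (Python) =====
-- def maplistx(currentx):
--     """
--         if currentx =[-1, 0, 1, 2, 4]
--         return [-1, 0, 1, 2, 3]
--         return a list of the same length of 1 arithmetic progression, but please ensure that 0 stays in the same position of the list
--     """
--     currentx=sorted(list(set(currentx)))
--     zero_index = currentx.index(0)
--     newx = [None] * len(currentx)
--     newx[zero_index] = 0
--     for i in range(zero_index - 1, -1, -1):
--         newx[i] = newx[i + 1] - 1
--     for i in range(zero_index + 1, len(currentx)):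
--         newx[i] = newx[i - 1] + 1
--     return currentx,newx
-- ===== SOURCE B (Python) =====
-- def maplistx(currentx):
--     currentx = sorted(set(currentx))
--     zero_index = currentx.index(0)
--     return currentx, list(range(-zero_index, len(currentx) - zero_index))
-- ===== Notes on version B (the rewrite author's own statement) =====
-- stated objective: simpler
-- what changed: replaced the pre-allocated list and the two directional fill loops with a single closed-form range(-zero_index, n - zero_index) construction
import Mathlib
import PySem

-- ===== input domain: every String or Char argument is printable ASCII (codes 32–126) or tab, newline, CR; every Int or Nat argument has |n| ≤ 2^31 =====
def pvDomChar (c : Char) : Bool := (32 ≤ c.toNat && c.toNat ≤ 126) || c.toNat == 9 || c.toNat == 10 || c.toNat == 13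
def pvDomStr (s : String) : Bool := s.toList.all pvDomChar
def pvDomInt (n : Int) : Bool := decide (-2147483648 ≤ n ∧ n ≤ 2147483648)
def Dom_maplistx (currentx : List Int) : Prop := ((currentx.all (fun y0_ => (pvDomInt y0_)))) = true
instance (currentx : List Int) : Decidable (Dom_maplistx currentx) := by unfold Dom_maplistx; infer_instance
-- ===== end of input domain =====

-- B replaces A's pre-allocated list and its two directional fill loops by the single
-- closed-form progression range(-zero_index, n - zero_index); objective: simpler.

-- ===== PORT A =====
def maplistx (currentx : List Int) : List Int × List Int :=
  -- currentx = sorted(list(set(currentx)))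
  let cx := PySem.List.sorted (PySem.Set.ofList currentx) id false
  -- zero_index = currentx.index(0)
  match PySem.List.index? cx 0 with
  | none => (cx, [])   -- Python raises ValueError here; excluded by Pre_maplistx
  | some z =>
    -- newx = [None] * len(currentx); newx[zero_index] = 0
    -- (placeholder 0 stands for None: every cell is overwritten before it is read)
    let newx0 := PySem.List.pySetD (List.replicate cx.length (0 : Int)) (z : Int) 0
    -- for i in range(zero_index - 1, -1, -1): newx[i] = newx[i + 1] - 1
    let newx1 := (PySem.List.pyRange ((z : Int) - 1) (-1) (-1)).foldl
      (fun acc i => PySem.List.pySetD acc i (PySem.List.pyGetD acc (i + 1) 0 - 1)) newx0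
    -- for i in range(zero_index + 1, len(currentx)): newx[i] = newx[i - 1] + 1
    let newx2 := (PySem.List.pyRange ((z : Int) + 1) (cx.length : Int) 1).foldl
      (fun acc i => PySem.List.pySetD acc i (PySem.List.pyGetD acc (i - 1) 0 + 1)) newx1
    (cx, newx2)

-- ===== PORT B =====
def maplistx_alt (currentx : List Int) : List Int × List Int :=
  -- currentx = sorted(set(currentx))
  let cx := PySem.List.sorted (PySem.Set.ofList currentx) id false
  -- zero_index = currentx.index(0)
  match PySem.List.index? cx 0 with
  | none => (cx, [])   -- Python raises ValueError here; excluded by Pre_maplistx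
  | some z =>
    -- return currentx, list(range(-zero_index, len(currentx) - zero_index))
    (cx, PySem.List.pyRange (-(z : Int)) ((cx.length : Int) - (z : Int)) 1)

-- ===== PRECONDITION & SPEC =====
-- Pre_ excludes exactly the inputs not containing 0, on which both Pythons raise ValueError.
def Pre_maplistx (currentx : List Int) : Prop := (0 : Int) ∈ currentx
instance (currentx : List Int) : Decidable (Pre_maplistx currentx) := by unfold Pre_maplistx; infer_instance
def pvWitness_maplistx : List Int := [4, 0, -1, 2, 1, 4]

def Spec_maplistx (currentx : List Int) (out : List Int × List Int) : Prop := out = maplistx_alt currentx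
instance (currentx : List Int) (out : List Int × List Int) : Decidable (Spec_maplistx currentx out) := by unfold Spec_maplistx; infer_instance

-- ===== CLAIM (what is proved, stated in full; the proofs are below) =====
def Claim_equal_maplistx : Prop := ∀ (currentx : List Int), Dom_maplistx currentx → Pre_maplistx currentx → Spec_maplistx currentx (maplistx currentx)

-- ===== LEMMAS AND PROOFS =====

theorem drop_set_self (l : List Int) (m : Nat) (x : Int) (h : m < l.length) :
    (l.set m x).drop m = x :: l.drop (m+1) := by
  rw [List.drop_eq_getElem_cons (by simpa using h), List.drop_set]
  simp

theorem maplistx_bwd (m : Nat) : ∀ (acc : List Int) (v : Int), m < acc.length →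
    PySem.List.pyGetD acc (m : Int) 0 = v →
    (PySem.List.pyRange ((m : Int) - 1) (-1) (-1)).foldl
      (fun acc i => PySem.List.pySetD acc i (PySem.List.pyGetD acc (i + 1) 0 - 1)) acc
    = (List.range m).map (fun k : Nat => v - (m : Int) + (k : Int)) ++ acc.drop m := by
  induction m with
  | zero =>
    intro acc v h hv
    rw [PySem.List.pyRange_neg_one_eq_nil (by omega)]
    simp
  | succ m ih =>
    intro acc v h hv
    rw [show ((m + 1 : Nat) : Int) - 1 = (m : Int) by push_cast; ring]
    rw [PySem.List.pyRange_neg_one_cons (by omega : (-1 : Int) < (m : Int))]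
    rw [List.foldl_cons]
    have hget : PySem.List.pyGetD acc ((m : Int) + 1) 0 = v := by
      rw [show ((m : Int) + 1) = ((m + 1 : Nat) : Int) by push_cast; ring]; exact hv
    rw [hget, PySem.List.pySetD_natCast]
    have hlen : m < (acc.set m (v - 1)).length := by simpa using (by omega : m < acc.length)
    have hget' : PySem.List.pyGetD (acc.set m (v - 1)) (m : Int) 0 = v - 1 := by
      rw [PySem.List.pyGetD_natCast, List.getD_eq_getElem _ _ hlen, List.getElem_set_self]
    rw [ih (acc.set m (v - 1)) (v - 1) hlen hget']
    rw [drop_set_self acc m (v - 1) (by omega)]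
    rw [List.range_succ, List.map_append]
    have hf : (fun k : Nat => v - 1 - (m : Int) + (k : Int))
            = (fun k : Nat => v - ((m + 1 : Nat) : Int) + (k : Int)) := by
      funext k; push_cast; ring
    rw [hf]
    simp
    ring

theorem take_set_self (l : List Int) (m : Nat) (x : Int) (h : m < l.length) :
    (l.set m x).take (m+1) = l.take m ++ [x] := by
  rw [List.take_add_one, List.take_set]
  simp [h]
  exact List.set_eq_of_length_le (by simp)

theorem maplistx_fwd (c : Nat) : ∀ (acc : List Int) (j : Nat) (v : Int), j < acc.length →
    c = acc.length - (j + 1) →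
    PySem.List.pyGetD acc (j : Int) 0 = v →
    (PySem.List.pyRange ((j : Int) + 1) (acc.length : Int) 1).foldl
      (fun acc i => PySem.List.pySetD acc i (PySem.List.pyGetD acc (i - 1) 0 + 1)) acc
    = acc.take (j + 1) ++ (List.range c).map (fun k : Nat => v + 1 + (k : Int)) := by
  induction c with
  | zero =>
    intro acc j v hj hc hv
    rw [PySem.List.pyRange_one_eq_nil (by omega)]
    simp [List.take_of_length_le (by omega : acc.length ≤ j + 1)]
  | succ c ih =>
    intro acc j v hj hc hv
    rw [PySem.List.pyRange_one_cons (by omega : ((j : Int) + 1) < (acc.length : Int))]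
    rw [List.foldl_cons]
    have hge : PySem.List.pyGetD acc ((j : Int) + 1 - 1) 0 = v := by
      rw [show ((j : Int) + 1 - 1) = (j : Int) by ring]; exact hv
    rw [hge, show ((j : Int) + 1) = ((j + 1 : Nat) : Int) by push_cast; ring,
       PySem.List.pySetD_natCast]
    have hlen1 : j + 1 < (acc.set (j+1) (v + 1)).length := by simpa using (by omega : j + 1 < acc.length)
    have hget' : PySem.List.pyGetD (acc.set (j+1) (v + 1)) ((j+1 : Nat) : Int) 0 = v + 1 := by
      rw [PySem.List.pyGetD_natCast, List.getD_eq_getElem _ _ hlen1, List.getElem_set_self]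
    have := ih (acc.set (j+1) (v + 1)) (j+1) (v + 1) hlen1 (by simpa using (by omega)) hget'
    rw [List.length_set] at this
    rw [this]
    rw [take_set_self acc (j+1) (v + 1) (by omega)]
    rw [List.range_succ_eq_map, List.append_assoc]
    simp
    intro a ha
    ring

-- ===== VERDICT (by name: the statement is the Claim_ definition above) =====
theorem maplistx_spec : Claim_equal_maplistx := by
  intro currentx _ hpre
  unfold Pre_maplistx at hpre
  unfold Spec_maplistx
  have hmem : (0:Int) ∈ PySem.List.sorted (PySem.Set.ofList currentx) id false := by
    simp [pysem, hpre]
  obtain ⟨z, hz⟩ : ∃ z, PySem.List.index? (PySem.List.sorted (PySem.Set.ofList currentx) id false) 0 = some z :=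
    Option.isSome_iff_exists.mp ((PySem.List.index?_isSome_iff _ 0).mpr hmem)
  unfold maplistx maplistx_alt
  simp only [hz]
  set cx := PySem.List.sorted (PySem.Set.ofList currentx) id false with hcx
  obtain ⟨hzlt, hcz, -⟩ := PySem.List.getElem_of_index?_eq_some hz
  -- name n
  set n := cx.length with hn
  -- newx0
  rw [PySem.List.pySetD_natCast, List.set_replicate_self]
  -- backward loop
  rw [maplistx_bwd z (List.replicate n 0) 0 (by simpa using hzlt)
      (by rw [PySem.List.pyGetD_natCast]; exact List.getD_replicate 0 (by simpa using hzlt))]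
  simp only [List.drop_replicate]
  set pre := (List.range z).map (fun k : Nat => (0:Int) - (z : Int) + (k : Int)) with hpreeq
  have hprelen : pre.length = z := by simp [hpreeq]
  have hlen1 : (pre ++ List.replicate (n - z) (0:Int)).length = n := by
    simp [hprelen]; omega
  -- forward loop
  have hget1 : PySem.List.pyGetD (pre ++ List.replicate (n - z) (0:Int)) (z : Int) 0 = 0 := by
    rw [PySem.List.pyGetD_natCast, List.getD_append_right _ _ _ _ (by omega)]
    rw [hprelen]
    simp
  have := maplistx_fwd (n - (z+1)) (pre ++ List.replicate (n - z) (0:Int)) z 0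
      (by omega) (by omega) hget1
  rw [hlen1] at this
  rw [this]
  -- closed form
  rw [PySem.List.pyRange_one]
  have htn : (((n:Int) - (z:Int)) - -(z:Int)).toNat = n := by omega
  rw [htn]
  have hsplit : n = (z + 1) + (n - (z+1)) := by omega
  rw [show List.range n = List.range ((z+1) + (n - (z+1))) from by rw [← hsplit]]
  rw [List.range_add, List.range_succ]
  -- take of append
  rw [List.take_append, hprelen]
  simp only [List.take_replicate]
  rw [show min (z + 1 - z) (n - z) = 1 by omega]
  rw [List.take_of_length_le (by omega : pre.length ≤ z + 1)]
  simp [hpreeq]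
  intro a ha
  ring
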